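-- pv_equiv track=rewrite | github.com/HCID274/MC_Servant | scripts/build_knowledge_base.py | add_aggregate_tags
-- ===== SOURCE A (Python) =====
-- from typing import Dict, List, Set, Optional, Any, Tuple
--
-- def add_aggregate_tags(tags: Dict[str, List[str]]) -> Dict[str, List[str]]:
--     """
--     添加聚合标签 - 将细粒度标签合并为粗粒度标签
--
--     例如: weapons = swords + bows + tridents
--     """
--     aggregates = {
--         # 武器聚合
--         "weapons": ["swords", "bows", "tridents"],
--
--         # 工具聚合
--         "tools": ["pickaxes", "axes", "shovels", "hoes"],
--
--         # 护甲聚合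
--         "armor": ["helmets", "chestplates", "leggings", "boots"],
--
--         # 木材聚合
--         "wood_materials": ["logs", "stripped_logs", "wood", "planks"],
--
--         # 矿石聚合 (包括深层)
--         "all_ores": ["ores", "deepslate_ores"],
--
--         # 建筑装饰聚合
--         "building_decorations": ["stairs", "slabs", "walls", "fences", "doors", "trapdoors"],
--
--         # 玻璃聚合
--         "all_glass": ["glass", "glass_panes"],
--
--         # 陶瓦聚合
--         "all_terracotta": ["terracotta", "glazed_terracotta"],
--
--         # 混凝土聚合
--         "all_concrete": ["concrete", "concrete_powder"],
--
--         # 船聚合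
--         "all_boats": ["boats", "chest_boats"],
--
--         # 告示牌聚合
--         "all_signs": ["signs", "hanging_signs"],
--     }
--
--     result = dict(tags)  # 复制原始 tags
--
--     for agg_tag, source_tags in aggregates.items():
--         agg_items = []
--         for src in source_tags:
--             if src in tags:
--                 agg_items.extend(tags[src])
--         if agg_items:
--             result[agg_tag] = sorted(set(agg_items))
--
--     return result
-- ===== SOURCE B (Python) =====
-- # Flat reverse index: source tag -> aggregate tag (the table inverted by hand),
-- # plus the aggregate emission order. One pass over the input routes each key.
-- _REV = {
--     "swords": "weapons", "bows": "weapons", "tridents": "weapons",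
--     "pickaxes": "tools", "axes": "tools", "shovels": "tools", "hoes": "tools",
--     "helmets": "armor", "chestplates": "armor", "leggings": "armor", "boots": "armor",
--     "logs": "wood_materials", "stripped_logs": "wood_materials",
--     "wood": "wood_materials", "planks": "wood_materials",
--     "ores": "all_ores", "deepslate_ores": "all_ores",
--     "stairs": "building_decorations", "slabs": "building_decorations",
--     "walls": "building_decorations", "fences": "building_decorations",
--     "doors": "building_decorations", "trapdoors": "building_decorations",
--     "glass": "all_glass", "glass_panes": "all_glass",
--     "terracotta": "all_terracotta", "glazed_terracotta": "all_terracotta",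
--     "concrete": "all_concrete", "concrete_powder": "all_concrete",
--     "boats": "all_boats", "chest_boats": "all_boats",
--     "signs": "all_signs", "hanging_signs": "all_signs",
-- }
--
-- _AGG_ORDER = ["weapons", "tools", "armor", "wood_materials", "all_ores",
--               "building_decorations", "all_glass", "all_terracotta",
--               "all_concrete", "all_boats", "all_signs"]
--
--
-- def add_aggregate_tags(tags):
--     buckets = {}
--     for key, items in tags.items():
--         agg = _REV.get(key)
--         if agg is not None:
--             buckets.setdefault(agg, set()).update(items)
--     result = dict(tags)
--     for agg in _AGG_ORDER:
--         bucket = buckets.get(agg)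
--         if bucket:
--             result[agg] = sorted(bucket)
--     return result
-- ===== Notes on version B (the rewrite author's own statement) =====
-- stated objective: alternative
-- what changed: A walks the aggregates table and, for each aggregate, probes the input dict for every one of its grouped source tags, concatenating then deduplicating; B keeps the table inverted as a flat source-tag -> aggregate map, makes a single pass over the input items routing each matching key's list into a per-aggregate bucket set built with setdefault, then emits the non-empty buckets in a separate aggregate-order list.
import Mathlib
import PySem

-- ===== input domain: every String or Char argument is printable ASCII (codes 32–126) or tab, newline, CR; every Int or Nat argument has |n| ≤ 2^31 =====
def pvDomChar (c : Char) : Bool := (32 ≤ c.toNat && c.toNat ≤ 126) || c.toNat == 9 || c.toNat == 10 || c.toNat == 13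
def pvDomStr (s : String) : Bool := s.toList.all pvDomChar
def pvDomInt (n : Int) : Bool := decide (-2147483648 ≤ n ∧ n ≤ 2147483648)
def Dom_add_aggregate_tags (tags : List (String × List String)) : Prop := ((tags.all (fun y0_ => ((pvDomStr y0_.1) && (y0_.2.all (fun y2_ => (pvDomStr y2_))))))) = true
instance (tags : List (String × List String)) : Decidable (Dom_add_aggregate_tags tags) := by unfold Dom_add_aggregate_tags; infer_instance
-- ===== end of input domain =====

-- B replaces A's table scan (per aggregate, probe every grouped source tag in the dict,
-- concatenate, deduplicate) with a hand-inverted flat map source-tag → aggregate and ONE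
-- pass over the input items that routes each matching key's list into a per-aggregate
-- bucket set; objective: alternative decomposition, equal return value. The association
-- list represents a Python dict, so both ports read it through PySem.Dict.ofList.

-- ===== PORT A =====
def aggregatesA : List (String × List String) :=
  [("weapons", ["swords", "bows", "tridents"]),
   ("tools", ["pickaxes", "axes", "shovels", "hoes"]),
   ("armor", ["helmets", "chestplates", "leggings", "boots"]),
   ("wood_materials", ["logs", "stripped_logs", "wood", "planks"]),
   ("all_ores", ["ores", "deepslate_ores"]),
   ("building_decorations", ["stairs", "slabs", "walls", "fences", "doors", "trapdoors"]),
   ("all_glass", ["glass", "glass_panes"]),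
   ("all_terracotta", ["terracotta", "glazed_terracotta"]),
   ("all_concrete", ["concrete", "concrete_powder"]),
   ("all_boats", ["boats", "chest_boats"]),
   ("all_signs", ["signs", "hanging_signs"])]

-- "agg_items = []; for src in source_tags: if src in tags: agg_items.extend(tags[src])"
def collectA (d : PySem.Dict String (List String)) (source_tags : List String) : List String :=
  source_tags.foldl (fun agg_items src =>
    match d.get? src with
    | some v => agg_items ++ v
    | none => agg_items) []

def add_aggregate_tags (tags : List (String × List String)) : List (String × List String) :=
  let d := PySem.Dict.ofList tags
  (aggregatesA.foldl (fun result p =>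
      let agg_items := collectA d p.2
      if agg_items ≠ [] then
        result.insert p.1 (PySem.List.sorted (PySem.Set.ofList agg_items) (fun x => x))
      else result)
    d).items

-- ===== PORT B =====
-- _REV: the table inverted by hand, a flat dict literal source tag → aggregate tag
def revB : PySem.Dict String String := PySem.Dict.ofList
  [("swords", "weapons"), ("bows", "weapons"), ("tridents", "weapons"),
   ("pickaxes", "tools"), ("axes", "tools"), ("shovels", "tools"), ("hoes", "tools"),
   ("helmets", "armor"), ("chestplates", "armor"), ("leggings", "armor"), ("boots", "armor"),
   ("logs", "wood_materials"), ("stripped_logs", "wood_materials"),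
   ("wood", "wood_materials"), ("planks", "wood_materials"),
   ("ores", "all_ores"), ("deepslate_ores", "all_ores"),
   ("stairs", "building_decorations"), ("slabs", "building_decorations"),
   ("walls", "building_decorations"), ("fences", "building_decorations"),
   ("doors", "building_decorations"), ("trapdoors", "building_decorations"),
   ("glass", "all_glass"), ("glass_panes", "all_glass"),
   ("terracotta", "all_terracotta"), ("glazed_terracotta", "all_terracotta"),
   ("concrete", "all_concrete"), ("concrete_powder", "all_concrete"),
   ("boats", "all_boats"), ("chest_boats", "all_boats"),
   ("signs", "all_signs"), ("hanging_signs", "all_signs")]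

def aggOrderB : List String :=
  ["weapons", "tools", "armor", "wood_materials", "all_ores",
   "building_decorations", "all_glass", "all_terracotta",
   "all_concrete", "all_boats", "all_signs"]

-- the single pass: buckets.setdefault(_REV[key], set()).update(items) when key is indexed
def bucketsB (d : PySem.Dict String (List String)) : PySem.Dict String (PySem.Set String) :=
  d.items.foldl (fun buckets kv =>
      match revB.get? kv.1 with
      | some agg => buckets.modify agg PySem.Set.empty (fun s => PySem.Set.update s kv.2)
      | none => buckets)
    PySem.Dict.empty

def add_aggregate_tags_alt (tags : List (String × List String)) : List (String × List String) :=
  let d := PySem.Dict.ofList tags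
  let buckets := bucketsB d
  (aggOrderB.foldl (fun result agg =>
      match buckets.get? agg with
      | some bucket =>
          if bucket ≠ [] then result.insert agg (PySem.List.sorted bucket (fun x => x))
          else result
      | none => result)
    d).items

-- ===== PRECONDITION & SPEC =====
def Spec_add_aggregate_tags (tags : List (String × List String)) (out : List (String × List String)) : Prop := out = add_aggregate_tags_alt tags
instance (tags : List (String × List String)) (out : List (String × List String)) : Decidable (Spec_add_aggregate_tags tags out) := by unfold Spec_add_aggregate_tags; infer_instance

-- ===== CLAIM (what is proved, stated in full; the proofs are below) =====
def Claim_equal_add_aggregate_tags : Prop := ∀ (tags : List (String × List String)), Dom_add_aggregate_tags tags → Spec_add_aggregate_tags tags (add_aggregate_tags tags)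

-- ===== LEMMAS AND PROOFS =====

def allSrcs : List String := revB.keys

theorem aggOrderB_eq : aggOrderB = aggregatesA.map (·.1) := rfl

set_option maxHeartbeats 2000000 in
theorem rev_lit : ∀ k ∈ allSrcs, ∀ p ∈ aggregatesA,
    (revB.get? k = some p.1 ↔ k ∈ p.2) := by decide

theorem srcs_sub : ∀ p ∈ aggregatesA, ∀ k ∈ p.2, k ∈ allSrcs := by decide

theorem rev_none (k : String) (hk : k ∉ allSrcs) : revB.get? k = none := by
  rw [PySem.Dict.get?_eq_none_iff_not_mem_keys]
  exact hk

-- for every row of the table, the reverse map sends k to that row's name iff k is a source of that row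
theorem revB_get (p : String × List String) (hp : p ∈ aggregatesA) (k : String) :
    revB.get? k = some p.1 ↔ k ∈ p.2 := by
  by_cases hk : k ∈ allSrcs
  · exact rev_lit k hk p hp
  · rw [rev_none k hk]
    simp only [false_iff, reduceCtorEq]
    exact fun h => hk (srcs_sub p hp k h)

-- A's inner collection loop, characterised by membership
theorem mem_collectA (d : PySem.Dict String (List String)) (srcs : List String) (x : String) :
    x ∈ collectA d srcs ↔ ∃ s ∈ srcs, ∃ v, d.get? s = some v ∧ x ∈ v := by
  have aux : ∀ (srcs : List String) (acc : List String),
      (x ∈ srcs.foldl (fun agg_items src =>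
          match d.get? src with
          | some v => agg_items ++ v
          | none => agg_items) acc ↔
        x ∈ acc ∨ ∃ s ∈ srcs, ∃ v, d.get? s = some v ∧ x ∈ v) := by
    intro srcs
    induction srcs with
    | nil => intro acc; simp
    | cons s rest ih =>
      intro acc
      simp only [List.foldl_cons]
      cases h : d.get? s with
      | none =>
        rw [ih, List.exists_mem_cons_iff]
        simp [h]
      | some v =>
        rw [ih, List.exists_mem_cons_iff]
        simp only [h, List.mem_append, Option.some.injEq]
        constructor
        · rintro (⟨hx | hx⟩ | hx)
          · exact Or.inl hx
          · exact Or.inr (Or.inl ⟨v, rfl, hx⟩)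
          · exact Or.inr (Or.inr hx)
        · rintro (hx | ⟨w, hw, hx⟩ | hx)
          · exact Or.inl (Or.inl hx)
          · exact Or.inl (Or.inr (hw ▸ hx))
          · exact Or.inr hx
  rw [collectA, aux]
  simp

-- B's routing pass over the items, characterised by membership
theorem mem_bucketsB_aux (l : List (String × List String)) :
    ∀ (a0 : PySem.Dict String (PySem.Set String)) (agg x : String),
    (x ∈ (l.foldl (fun buckets kv =>
        match revB.get? kv.1 with
        | some agg => buckets.modify agg PySem.Set.empty (fun s => PySem.Set.update s kv.2)
        | none => buckets) a0).getD agg PySem.Set.empty ↔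
      x ∈ a0.getD agg PySem.Set.empty ∨ ∃ q ∈ l, revB.get? q.1 = some agg ∧ x ∈ q.2) := by
  induction l with
  | nil => intro a0 agg x; simp
  | cons q rest ih =>
    intro a0 agg x
    simp only [List.foldl_cons]
    cases h : revB.get? q.1 with
    | none =>
      rw [ih, List.exists_mem_cons_iff]
      simp [h]
    | some g =>
      rw [ih, List.exists_mem_cons_iff]
      simp only [h, Option.some.injEq]
      rw [PySem.Dict.getD_modify]
      by_cases hg : agg = g
      · subst hg
        rw [if_pos rfl, PySem.Set.mem_update]
        constructor
        · rintro (⟨hx | hx⟩ | hx)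
          · exact Or.inl hx
          · exact Or.inr (Or.inl ⟨rfl, hx⟩)
          · exact Or.inr (Or.inr hx)
        · rintro (hx | ⟨_, hx⟩ | hx)
          · exact Or.inl (Or.inl hx)
          · exact Or.inl (Or.inr hx)
          · exact Or.inr hx
      · rw [if_neg hg]
        constructor
        · rintro (hx | hx)
          · exact Or.inl hx
          · exact Or.inr (Or.inr hx)
        · rintro (hx | ⟨hgg, _⟩ | hx)
          · exact Or.inl hx
          · exact absurd hgg.symm hg
          · exact Or.inr hx

theorem mem_bucketsB (d : PySem.Dict String (List String)) (agg x : String) :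
    x ∈ (bucketsB d).getD agg PySem.Set.empty ↔
      ∃ q ∈ d.items, revB.get? q.1 = some agg ∧ x ∈ q.2 := by
  rw [bucketsB, mem_bucketsB_aux]
  simp

-- every bucket is a genuine set (no duplicates)
theorem nodup_bucketsB (d : PySem.Dict String (List String)) (agg : String) :
    ((bucketsB d).getD agg PySem.Set.empty).Nodup := by
  have aux : ∀ (l : List (String × List String)) (a0 : PySem.Dict String (PySem.Set String)),
      (∀ g, (a0.getD g PySem.Set.empty).Nodup) → ∀ g,
      ((l.foldl (fun buckets kv =>
          match revB.get? kv.1 with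
          | some agg => buckets.modify agg PySem.Set.empty (fun s => PySem.Set.update s kv.2)
          | none => buckets) a0).getD g PySem.Set.empty).Nodup := by
    intro l
    induction l with
    | nil => intro a0 h0 g; simpa using h0 g
    | cons q rest ih =>
      intro a0 h0 g
      simp only [List.foldl_cons]
      cases h : revB.get? q.1 with
      | none => exact ih a0 h0 g
      | some gg =>
        refine ih _ ?_ g
        intro g'
        rw [PySem.Dict.getD_modify]
        split_ifs with hg
        · exact PySem.Set.nodup_update _ _ (h0 gg)
        · exact h0 g'
  rw [bucketsB]
  refine aux _ _ ?_ agg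
  intro g
  simp

-- per row: A's deduplicated collection and B's bucket hold the same elements
theorem row_perm (tags : List (String × List String)) (p : String × List String) (hp : p ∈ aggregatesA) :
    (PySem.Set.ofList (collectA (PySem.Dict.ofList tags) p.2)).Perm
      ((bucketsB (PySem.Dict.ofList tags)).getD p.1 PySem.Set.empty) := by
  rw [List.perm_ext_iff_of_nodup (PySem.Set.nodup_ofList _) (nodup_bucketsB _ _)]
  intro x
  rw [PySem.Set.mem_ofList, mem_collectA, mem_bucketsB]
  constructor
  · rintro ⟨s, hs, v, hget, hx⟩
    exact ⟨(s, v), (PySem.Dict.get?_eq_some_iff_mem_items _ _ _ (PySem.Dict.nodup_keys_ofList tags)).1 hget,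
           (revB_get p hp s).2 hs, hx⟩
  · rintro ⟨q, hq, hrev, hx⟩
    exact ⟨q.1, (revB_get p hp q.1).1 hrev, q.2,
           PySem.Dict.get?_of_mem_items _ hq (PySem.Dict.nodup_keys_ofList tags), hx⟩

theorem main_eq (tags : List (String × List String)) :
    add_aggregate_tags tags = add_aggregate_tags_alt tags := by
  unfold add_aggregate_tags add_aggregate_tags_alt
  rw [aggOrderB_eq]
  simp only [List.foldl_map]
  refine congrArg PySem.Dict.items (PySem.List.foldl_congr_mem aggregatesA _ _ (PySem.Dict.ofList tags) ?_)
  intro r p hp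
  have hperm := row_perm tags p hp
  show (if collectA (PySem.Dict.ofList tags) p.2 ≠ [] then
          r.insert p.1 (PySem.List.sorted (PySem.Set.ofList (collectA (PySem.Dict.ofList tags) p.2)) (fun x => x))
        else r) =
       (match (bucketsB (PySem.Dict.ofList tags)).get? p.1 with
        | some bucket =>
            if bucket ≠ [] then r.insert p.1 (PySem.List.sorted bucket (fun x => x)) else r
        | none => r)
  cases h : (bucketsB (PySem.Dict.ofList tags)).get? p.1 with
  | none =>
    have hD : (bucketsB (PySem.Dict.ofList tags)).getD p.1 PySem.Set.empty = [] := by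
      simp [PySem.Dict.getD, h, PySem.Set.empty]
    rw [hD] at hperm
    have hA : collectA (PySem.Dict.ofList tags) p.2 = [] := by
      by_contra hne
      rcases List.exists_mem_of_ne_nil _ hne with ⟨x, hx⟩
      have hmem : x ∈ PySem.Set.ofList (collectA (PySem.Dict.ofList tags) p.2) :=
        (PySem.Set.mem_ofList _ _).2 hx
      rw [hperm.eq_nil] at hmem
      exact List.not_mem_nil hmem
    simp [hA]
  | some bucket =>
    have hD : (bucketsB (PySem.Dict.ofList tags)).getD p.1 PySem.Set.empty = bucket := by
      simp [PySem.Dict.getD, h]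
    rw [hD] at hperm
    have hsorted : PySem.List.sorted (PySem.Set.ofList (collectA (PySem.Dict.ofList tags) p.2)) (fun x => x) =
        PySem.List.sorted bucket (fun x => x) :=
      PySem.List.sorted_eq_sorted_of_perm _ _ _ (fun _ _ hh => hh) hperm
    have hempty : collectA (PySem.Dict.ofList tags) p.2 ≠ [] ↔ bucket ≠ [] := by
      constructor
      · intro hne hB
        rw [hB] at hperm
        rcases List.exists_mem_of_ne_nil _ hne with ⟨x, hx⟩
        have hmem : x ∈ PySem.Set.ofList (collectA (PySem.Dict.ofList tags) p.2) :=
          (PySem.Set.mem_ofList _ _).2 hx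
        rw [hperm.eq_nil] at hmem
        exact List.not_mem_nil hmem
      · intro hne hA
        apply hne
        have hnil : PySem.Set.ofList (collectA (PySem.Dict.ofList tags) p.2) = [] := by rw [hA]; rfl
        rw [hnil] at hperm
        exact hperm.symm.eq_nil
    rw [show (match some bucket with
        | some bucket => if bucket ≠ [] then r.insert p.1 (PySem.List.sorted bucket fun x => x) else r
        | none => r) =
        if bucket ≠ [] then r.insert p.1 (PySem.List.sorted bucket fun x => x) else r from rfl]
    by_cases hc : collectA (PySem.Dict.ofList tags) p.2 ≠ []
    · rw [if_pos hc, if_pos (hempty.1 hc), hsorted]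
    · rw [if_neg hc, if_neg (fun hh => hc (hempty.2 hh))]

-- ===== VERDICT (by name: the statement is the Claim_ definition above) =====
theorem add_aggregate_tags_spec : Claim_equal_add_aggregate_tags := by
  intro tags _
  exact main_eq tags
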